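-- pv_equiv track=rewrite | github.com/YerongLi/dive | hackerrank/+stripe/hidecard/main.py | redact_card_numbers
-- ===== SOURCE A (Python) =====
-- def redact_card_numbers(text):
--     n = len(text)
--     i = 0
--     start = None
--     ans = []
--     while i < n:
--         if text[i].isdigit():
--             start = i
--             while i < n and text[i].isdigit():
--                 i+= 1
--             number = text[start: i]
--             if 13<= len(number) <= 16:
--                 ans.append((len(number) - 4) * 'x' + text[i-4:i])
--             else:
--                 ans.append(number)
--         else:
--             ans.append(text[i])
--             i+= 1
--     result = ''.join(ans)
--     return result
-- ===== SOURCE B (Python) =====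
-- def _flush(run):
--     k = len(run)
--     if 13 <= k <= 16:
--         return 'x' * (k - 4) + ''.join(run[-4:])
--     return ''.join(run)
--
--
-- def redact_card_numbers(text):
--     # Single forward pass with a pending digit-run buffer; no index arithmetic,
--     # no inner while loop, no slicing of the original text.
--     out = []
--     run = []
--     for ch in text:
--         if ch.isdigit():
--             run.append(ch)
--         else:
--             out.append(_flush(run))
--             run = []
--             out.append(ch)
--     out.append(_flush(run))
--     return ''.join(out)
-- ===== Notes on version B (the rewrite author's own statement) =====
-- stated objective: simpler
-- what changed: Replaced the index-based outer/inner while-loop scan with text slicing by a single for-loop fold that keeps a pending digit-run buffer and flushes it at each non-digit (and once at the end).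
import Mathlib
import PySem

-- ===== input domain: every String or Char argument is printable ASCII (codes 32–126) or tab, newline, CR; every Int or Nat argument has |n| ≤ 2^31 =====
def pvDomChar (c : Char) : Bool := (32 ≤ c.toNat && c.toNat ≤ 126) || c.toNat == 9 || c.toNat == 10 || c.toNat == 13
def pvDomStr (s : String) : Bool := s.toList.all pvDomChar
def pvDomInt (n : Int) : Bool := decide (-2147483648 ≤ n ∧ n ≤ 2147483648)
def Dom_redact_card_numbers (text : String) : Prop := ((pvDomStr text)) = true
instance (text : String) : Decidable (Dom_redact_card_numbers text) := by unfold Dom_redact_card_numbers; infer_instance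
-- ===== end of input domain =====

-- B replaces A's index/while scan with a one-pass fold over the characters keeping a
-- pending digit-run buffer (objective: simpler; same O(n) cost).

-- ===== PORT A =====
-- A scans with an index i: on a digit it runs the inner while to the end of the maximal
-- digit run; number = text[start:i] is exactly that run and text[i-4:i] its last 4
-- characters (run length ≥ 13 in that branch), ported as the run and run.drop (len-4).
def redactGoA : List Char → List (List Char)
  | [] => []
  | c :: rest =>
    if PySem.Chars.isdigit c then
      let number := c :: rest.takeWhile (fun a => PySem.Chars.isdigit a)
      (if 13 ≤ number.length ∧ number.length ≤ 16 then
          List.replicate (number.length - 4) 'x' ++ number.drop (number.length - 4)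
        else number) :: redactGoA (rest.dropWhile (fun a => PySem.Chars.isdigit a))
    else [c] :: redactGoA rest
termination_by l => l.length
decreasing_by
  · simpa using Nat.lt_succ_of_le (List.length_dropWhile_le _ _)
  · simp

def redact_card_numbers (text : String) : String :=
  String.mk (redactGoA text.toList).flatten

-- ===== PORT B =====
def redactFlush (run : List Char) : List Char :=
  if 13 ≤ run.length ∧ run.length ≤ 16 then
    List.replicate (run.length - 4) 'x' ++ run.drop (run.length - 4)  -- run[-4:], length ≥ 13
  else run

def redactStepB (s : List (List Char) × List Char) (ch : Char) :
    List (List Char) × List Char :=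
  if PySem.Chars.isdigit ch then (s.1, s.2 ++ [ch])
  else (s.1 ++ [redactFlush s.2, [ch]], [])

def redact_card_numbers_alt (text : String) : String :=
  String.mk (((text.toList.foldl redactStepB ([], [])).1
      ++ [redactFlush (text.toList.foldl redactStepB ([], [])).2]).flatten)

-- ===== PRECONDITION & SPEC =====
def Spec_redact_card_numbers (text : String) (out : String) : Prop := out = redact_card_numbers_alt text
instance (text : String) (out : String) : Decidable (Spec_redact_card_numbers text out) := by unfold Spec_redact_card_numbers; infer_instance

-- ===== CLAIM (what is proved, stated in full; the proofs are below) =====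
def Claim_equal_redact_card_numbers : Prop := ∀ (text : String), Dom_redact_card_numbers text → Spec_redact_card_numbers text (redact_card_numbers text)

-- ===== LEMMAS AND PROOFS =====

lemma redactGoA_flatten (cs : List Char) :
    (redactGoA cs).flatten
      = redactFlush (cs.takeWhile (fun a => PySem.Chars.isdigit a))
        ++ (redactGoA (cs.dropWhile (fun a => PySem.Chars.isdigit a))).flatten := by
  cases cs with
  | nil => simp [redactGoA, redactFlush]
  | cons c rest =>
    by_cases h : PySem.Chars.isdigit c
    · simp [redactGoA, redactFlush, h]
    · simp [redactGoA, redactFlush, h]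

lemma redactFoldB (cs : List Char) : ∀ (out : List (List Char)) (run : List Char),
    ((cs.foldl redactStepB (out, run)).1
      ++ [redactFlush (cs.foldl redactStepB (out, run)).2]).flatten
      = out.flatten
        ++ redactFlush (run ++ cs.takeWhile (fun a => PySem.Chars.isdigit a))
        ++ (redactGoA (cs.dropWhile (fun a => PySem.Chars.isdigit a))).flatten := by
  induction cs with
  | nil => intro out run; simp [redactGoA]
  | cons c rest ih =>
    intro out run
    by_cases h : PySem.Chars.isdigit c
    · simpa [redactStepB, h, List.takeWhile_cons, List.dropWhile_cons,
        List.append_assoc] using ih out (run ++ [c])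
    · have h2 := ih (out ++ [redactFlush run, [c]]) []
      simp only [List.nil_append] at h2
      simp only [List.foldl_cons, redactStepB, h, Bool.false_eq_true, not_false_iff, if_neg]
      rw [h2]
      simp only [List.takeWhile_cons, List.dropWhile_cons, h, Bool.false_eq_true,
        not_false_iff, if_neg, redactGoA, List.flatten_cons, List.flatten_append,
        List.flatten_nil, List.append_nil, List.append_assoc]
      rw [← redactGoA_flatten rest]


-- ===== VERDICT (by name: the statement is the Claim_ definition above) =====
theorem redact_card_numbers_spec : Claim_equal_redact_card_numbers := by
  intro text _
  unfold Spec_redact_card_numbers redact_card_numbers redact_card_numbers_alt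
  rw [redactFoldB text.toList [] []]
  rw [redactGoA_flatten text.toList]
  simp
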